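-- pv_equiv track=rewrite | github.com/Kile/Alternative-Vote-evaluator | main.py | get_first_choice_helper
-- ===== SOURCE A (Python) =====
-- from typing import Dict, List
--
-- def get_first_choice_helper(
--     voter: int, round: int, votes: Dict[str, Dict[int, List[int]]], excluded: List[str]
-- ) -> str | None:
--     """
--     Get the names that a person has previously voted for.
--
--     Parameters
--     ----------
--     voter: :class:`int`
--         The voter for which the first choices are to be determined.
--     round: :class:`int`
--         The round for which the first choices are to be determined.
--     votes: :class:`Dict[str, Dict[int, List[int]]]`
--         The parsed data for the role.
--     excluded: :class:`List[str]`
--         The names to be excluded from the first choice determination.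
--     """
--     # Get the first choice for the voter
--     non_excluded = {name: val for name, val in votes.items() if name not in excluded}
--
--     # Get the first choice for the voter
--     choices = []
--     for r in range(1, round + 1):
--         for name, fields in non_excluded.items():
--             if r in fields and voter in fields[r]:
--                 choices.append((name, r))
--
--     if len(choices) == 0:
--         return None
--     # Find the first choice for the voter (lowest round number)
--     first_choice = min(choices, key=lambda x: x[1])[0]
--     return first_choice
-- ===== SOURCE B (Python) =====
-- def get_first_choice_helper(voter, round, votes, excluded):
--     # single fused early-exit pass: ascending rounds, dict order inside a round
--     ex = set(excluded)
--     items = [(name, fields) for name, fields in votes.items() if name not in ex]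
--     for r in range(1, round + 1):
--         for name, fields in items:
--             if r in fields and voter in fields[r]:
--                 return name
--     return None
-- ===== Notes on version B (the rewrite author's own statement) =====
-- stated objective: simpler
-- what changed: Replaces the accumulate-all-(name,round)-pairs list plus a separate min-by-round scan with one fused early-exit pass over ascending rounds, returning the first matching non-excluded name directly.
import Mathlib
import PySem

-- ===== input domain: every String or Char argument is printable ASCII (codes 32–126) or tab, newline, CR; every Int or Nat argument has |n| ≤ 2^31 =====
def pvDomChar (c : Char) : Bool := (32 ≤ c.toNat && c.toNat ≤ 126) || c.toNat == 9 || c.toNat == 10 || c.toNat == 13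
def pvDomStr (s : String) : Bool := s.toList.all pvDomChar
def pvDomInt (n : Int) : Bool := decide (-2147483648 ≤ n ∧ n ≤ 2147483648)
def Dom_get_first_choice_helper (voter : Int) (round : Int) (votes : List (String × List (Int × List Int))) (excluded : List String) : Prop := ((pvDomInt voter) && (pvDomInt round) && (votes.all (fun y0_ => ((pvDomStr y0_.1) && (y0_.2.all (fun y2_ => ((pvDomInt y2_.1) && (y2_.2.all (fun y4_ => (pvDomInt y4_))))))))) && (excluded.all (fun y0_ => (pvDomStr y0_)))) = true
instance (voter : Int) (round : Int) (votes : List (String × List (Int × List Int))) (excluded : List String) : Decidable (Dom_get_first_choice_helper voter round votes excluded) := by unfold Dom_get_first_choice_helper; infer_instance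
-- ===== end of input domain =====

-- B replaces A's accumulate-all-choices list and min-by-round scan with one fused
-- early-exit pass (simpler decomposition; same worst-case cost).


-- ===== PORT A =====
-- 'r in fields and voter in fields[r]' on the dict 'fields' (both Pythons do exactly this test)
def pvHit (voter r : Int) (fields : List (Int × List Int)) : Bool :=
  match fields.find? (fun p => p.1 == r) with
  | some p => p.2.contains voter
  | none => false

def get_first_choice_helper (voter : Int) (round : Int) (votes : List (String × List (Int × List Int))) (excluded : List String) : Option String :=
  let non_excluded := votes.filter (fun nv => !(excluded.contains nv.1))
  let choices := (PySem.List.pyRange 1 (round + 1) 1).foldl (fun acc r =>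
      non_excluded.foldl (fun acc2 nv =>
        if pvHit voter r nv.2 then acc2 ++ [(nv.1, r)] else acc2) acc) ([] : List (String × Int))
  if choices.length = 0 then none
  else (PySem.List.min? choices (fun x => x.2)).map (fun x => x.1)

-- ===== PORT B =====
def get_first_choice_helper_alt (voter : Int) (round : Int) (votes : List (String × List (Int × List Int))) (excluded : List String) : Option String :=
  let ex : PySem.Set String := PySem.Set.ofList excluded
  let items := votes.filter (fun nv => !(PySem.Set.contains ex nv.1))
  (PySem.List.pyRange 1 (round + 1) 1).findSome? (fun r =>
    items.findSome? (fun nv => if pvHit voter r nv.2 then some nv.1 else none))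

-- ===== PRECONDITION & SPEC =====
def Spec_get_first_choice_helper (voter : Int) (round : Int) (votes : List (String × List (Int × List Int))) (excluded : List String) (out : Option String) : Prop := out = get_first_choice_helper_alt voter round votes excluded
instance (voter : Int) (round : Int) (votes : List (String × List (Int × List Int))) (excluded : List String) (out : Option String) : Decidable (Spec_get_first_choice_helper voter round votes excluded out) := by unfold Spec_get_first_choice_helper; infer_instance

-- ===== CLAIM (what is proved, stated in full; the proofs are below) =====
def Claim_equal_get_first_choice_helper : Prop := ∀ (voter : Int) (round : Int) (votes : List (String × List (Int × List Int))) (excluded : List String), Dom_get_first_choice_helper voter round votes excluded → Spec_get_first_choice_helper voter round votes excluded (get_first_choice_helper voter round votes excluded)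

-- ===== LEMMAS AND PROOFS =====

-- the block of choices contributed by round r
def pvBlock (voter : Int) (votes : List (String × List (Int × List Int))) (excluded : List String) (r : Int) : List (String × Int) :=
  ((votes.filter (fun nv => !(excluded.contains nv.1))).filter (fun nv => pvHit voter r nv.2)).map (fun nv => (nv.1, r))

-- findSome? with an if-guard is head? of the filtered-and-mapped list
theorem pv_findSome?_if {α β : Type} (p : α → Bool) (f : α → β) (l : List α) :
    l.findSome? (fun x => if p x then some (f x) else none) = ((l.filter p).map f).head? := by
  induction l with
  | nil => rfl
  | cons x t ih =>
      by_cases h : p x = true <;> simp [h, ih]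

-- push Option.map through findSome?
theorem pv_findSome?_map {α β γ : Type} (f : α → Option β) (h : β → γ) (l : List α) :
    l.findSome? (fun x => (f x).map h) = (l.findSome? f).map h := by
  induction l with
  | nil => rfl
  | cons x t ih =>
      cases hx : f x <;> simp [hx, ih]

-- the min? fold leaves the accumulator alone when nothing beats it
theorem pv_foldl_min_stay {α κ : Type} [LinearOrder κ] (key : α → κ) (m : α) (t : List α)
    (h : ∀ y ∈ t, key m ≤ key y) :
    t.foldl (fun acc x =>
      match acc with
      | none => some x
      | some m' => if key x < key m' then some x else some m') (some m) = some m := by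
  induction t with
  | nil => rfl
  | cons x t ih =>
      have hx : ¬ key x < key m := not_lt.mpr (h x (by simp))
      simp only [List.foldl_cons, hx, if_false]
      exact ih (fun y hy => h y (by simp [hy]))

-- Python's min with key returns the head of a key-nondecreasing list
theorem pv_min?_eq_head {α κ : Type} [LinearOrder κ] (key : α → κ) (l : List α)
    (h : l.Pairwise (fun a b => key a ≤ key b)) :
    PySem.List.min? l key = l.head? := by
  cases l with
  | nil => rfl
  | cons x t =>
      simp only [PySem.List.min?, List.foldl_cons, List.head?_cons]
      exact pv_foldl_min_stay key x t (by
        intro y hy; exact (List.pairwise_cons.mp h).1 y hy)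

-- choices of A is the flatMap of the per-round blocks
theorem pv_choices_eq (voter : Int) (votes : List (String × List (Int × List Int))) (excluded : List String) (rs : List Int) (acc : List (String × Int)) :
    rs.foldl (fun acc r =>
        (votes.filter (fun nv => !(excluded.contains nv.1))).foldl (fun acc2 nv =>
          if pvHit voter r nv.2 then acc2 ++ [(nv.1, r)] else acc2) acc) acc
      = acc ++ rs.flatMap (pvBlock voter votes excluded) := by
  induction rs generalizing acc with
  | nil => simp
  | cons r rs ih =>
      simp only [List.foldl_cons, List.flatMap_cons]
      rw [ih]
      have hinner :
          (votes.filter (fun nv => !(excluded.contains nv.1))).foldl (fun acc2 nv =>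
            if pvHit voter r nv.2 then acc2 ++ [(nv.1, r)] else acc2) acc
            = acc ++ pvBlock voter votes excluded r :=
        by exact PySem.List.foldl_append_if _ _ _ _
      rw [hinner, List.append_assoc]

-- the flatMap of blocks is nondecreasing in the round component
theorem pv_flatMap_pairwise (voter : Int) (votes : List (String × List (Int × List Int))) (excluded : List String) (rs : List Int)
    (hrs : rs.Pairwise (· < ·)) :
    (rs.flatMap (pvBlock voter votes excluded)).Pairwise (fun a b => a.2 ≤ b.2) := by
  have hmem : ∀ (r : Int) (p : String × Int), p ∈ pvBlock voter votes excluded r → p.2 = r := by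
    intro r p hp
    simp only [pvBlock, List.mem_map] at hp
    obtain ⟨nv, _, rfl⟩ := hp; rfl
  induction rs with
  | nil => simp
  | cons r rs ih =>
      obtain ⟨hr, hrs'⟩ := List.pairwise_cons.mp hrs
      simp only [List.flatMap_cons]
      refine List.pairwise_append.mpr ⟨?_, ih hrs', ?_⟩
      · have : ∀ a ∈ pvBlock voter votes excluded r, ∀ b ∈ pvBlock voter votes excluded r, a.2 ≤ b.2 := by
          intro a ha b hb; rw [hmem r a ha, hmem r b hb]
        exact List.pairwise_of_forall_mem_list this
      · intro a ha b hb
        simp only [List.mem_flatMap] at hb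
        obtain ⟨r', hr', hb⟩ := hb
        rw [hmem r a ha, hmem r' b hb]
        exact le_of_lt (hr r' hr')

-- B is the head of the flatMap, projected to the name
theorem pv_alt_eq (voter round : Int) (votes : List (String × List (Int × List Int))) (excluded : List String) :
    get_first_choice_helper_alt voter round votes excluded
      = (((PySem.List.pyRange 1 (round + 1) 1).flatMap (pvBlock voter votes excluded)).head?).map (fun x => x.1) := by
  unfold get_first_choice_helper_alt
  have hitems : votes.filter (fun nv => !(PySem.Set.contains (PySem.Set.ofList excluded) nv.1))
      = votes.filter (fun nv => !(excluded.contains nv.1)) := by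
    apply List.filter_congr
    intro nv _
    have : PySem.Set.contains (PySem.Set.ofList excluded) nv.1 = excluded.contains nv.1 := by
      by_cases h : nv.1 ∈ excluded <;>
        simp [PySem.Set.contains, PySem.Set.mem_ofList, h]
    rw [this]
  simp only [hitems]
  have inner : ∀ r : Int,
      (votes.filter (fun nv => !(excluded.contains nv.1))).findSome?
          (fun nv => if pvHit voter r nv.2 then some nv.1 else none)
        = ((pvBlock voter votes excluded r).head?).map (fun x => x.1) := by
    intro r
    rw [pv_findSome?_if (fun nv : String × List (Int × List Int) => pvHit voter r nv.2) (fun nv => nv.1) (votes.filter (fun nv => !(excluded.contains nv.1)))]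
    simp [pvBlock, List.head?_map]
    rfl
  rw [List.head?_flatMap, Eq.symm (pv_findSome?_map (fun r => (pvBlock voter votes excluded r).head?) (fun x => x.1) _)]
  simp only [inner]

-- ===== VERDICT (by name: the statement is the Claim_ definition above) =====
theorem get_first_choice_helper_spec : Claim_equal_get_first_choice_helper := by
  intro voter round votes excluded _
  unfold Spec_get_first_choice_helper
  simp only [get_first_choice_helper]
  rw [pv_choices_eq voter votes excluded (PySem.List.pyRange 1 (round + 1) 1) [],
    pv_alt_eq voter round votes excluded]
  simp only [List.nil_append]
  set cs := (PySem.List.pyRange 1 (round + 1) 1).flatMap (pvBlock voter votes excluded) with hcs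
  by_cases h : cs.length = 0
  · simp [List.length_eq_zero_iff.mp h]
  · rw [if_neg h, pv_min?_eq_head _ cs (pv_flatMap_pairwise voter votes excluded _ (PySem.List.pairwise_lt_pyRange_one 1 (round + 1)))]
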